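-- pv_equiv track=rewrite | github.com/kuruminpz/Multiplier_encadeado | functions.py | separador
-- ===== SOURCE A (Python) =====
-- def separador(string):
--     list = []
--     counter = 0
--     if len(string) % 2 == 1:
--         list.append(string[0])
--         counter += 1
--     list += [string[i:i + 2] for i in range(counter, len(string), 2)]
--     return list
-- ===== SOURCE B (Python) =====
-- def separador(string):
--     # Pair from the right; the leftover single char (odd length) falls at the front.
--     chunks = []
--     for i in range(len(string), 0, -2):
--         chunks.append(string[max(0, i - 2):i])
--     chunks.reverse()
--     return chunks
-- ===== Notes on version B (the rewrite author's own statement) =====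
-- stated objective: simpler
-- what changed: B pairs the string right-to-left with a clamped lower slice bound and reverses the result, eliminating A's explicit odd-length branch and counter.
import Mathlib
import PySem

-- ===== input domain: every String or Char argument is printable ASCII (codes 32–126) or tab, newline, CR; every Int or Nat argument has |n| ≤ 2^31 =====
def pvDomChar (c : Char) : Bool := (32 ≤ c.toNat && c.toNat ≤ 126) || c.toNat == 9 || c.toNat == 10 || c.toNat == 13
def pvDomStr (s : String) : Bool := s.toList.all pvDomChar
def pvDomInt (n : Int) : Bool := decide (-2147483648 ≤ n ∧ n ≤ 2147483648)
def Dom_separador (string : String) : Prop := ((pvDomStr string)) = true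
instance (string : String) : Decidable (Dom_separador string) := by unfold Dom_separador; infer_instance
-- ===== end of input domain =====

-- B pairs the string from the right with a clamped slice and reverses, dropping A's odd-length branch (simpler; return value equivalence).
-- ===== PORT A =====
def separador (string : String) : List String :=
  let n := string.toList.length
  let (lst, counter) : List String × Int :=
    if n % 2 == 1 then
      -- string[0] in Python yields a one-character string; pyGet? is some here since n is odd (≥ 1)
      (((PySem.Str.pyGet? string 0).map (fun c => String.ofList [c])).toList, 1)
    else ([], 0)
  lst ++ (PySem.List.pyRange counter (n : Int) 2).map
      (fun i => PySem.Str.slice string (some i) (some (i + 2)))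

-- ===== PORT B =====
def separador_alt (string : String) : List String :=
  let chunks := (PySem.List.pyRange (string.toList.length : Int) 0 (-2)).foldl
      (fun acc i => acc ++ [PySem.Str.slice string (some (max 0 (i - 2))) (some i)]) []
  chunks.reverse

-- ===== PRECONDITION & SPEC =====
def Spec_separador (string : String) (out : List String) : Prop := out = separador_alt string
instance (string : String) (out : List String) : Decidable (Spec_separador string out) := by unfold Spec_separador; infer_instance

-- ===== CLAIM (what is proved, stated in full; the proofs are below) =====
def Claim_equal_separador : Prop := ∀ (string : String), Dom_separador string → Spec_separador string (separador string)


-- ===== LEMMAS AND PROOFS =====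

theorem pv_down (n : Nat) : PySem.List.pyRange (n:Int) 0 (-2) =
    (List.range ((n+1)/2)).map (fun k : Nat => (n:Int) - 2*(k:Int)) := by
  simp only [PySem.List.pyRange]
  norm_num
  split_ifs with h
  · have hc : (((n:Int) + 2 - 1) / 2).toNat = (n+1)/2 := by omega
    rw [hc]
    exact List.map_congr_left (fun k _ => by ring)
  · have h0 : n = 0 := by omega
    subst h0; simp

theorem pv_up (a b : Int) :
    PySem.List.pyRange a b 2 = (List.range (((b - a + 1)/2).toNat)).map
      (fun k : Nat => a + 2*(k:Int)) := by
  rw [PySem.List.pyRange_of_pos a b (by norm_num)]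
  split_ifs with h
  · have hc : ((b - a + 2 - 1) / 2).toNat = ((b - a + 1)/2).toNat := by omega
    rw [hc]
  · have h0 : ((b - a + 1)/2).toNat = 0 := by omega
    rw [h0]

theorem pv_rev (n : Nat) : (PySem.List.pyRange (n:Int) 0 (-2)).reverse =
    PySem.List.pyRange (if n % 2 = 1 then 1 else 2) ((n:Int)+2) 2 := by
  rw [pv_down, pv_up]
  apply List.ext_getElem
  · simp; split_ifs <;> omega
  · intro i h1 h2
    simp only [List.getElem_reverse, List.length_map, List.length_range, List.getElem_map, List.getElem_range]
    simp only [List.length_reverse, List.length_map, List.length_range] at h1 h2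
    split_ifs at h2 ⊢ <;> omega

theorem pv_cons (a b : Int) (h : a < b) :
    PySem.List.pyRange a b 2 = a :: PySem.List.pyRange (a+2) b 2 := by
  rw [pv_up a b, pv_up (a+2) b]
  have hm : ((b - a + 1)/2).toNat = ((b - (a+2) + 1)/2).toNat + 1 := by omega
  rw [hm, List.range_succ_eq_map, List.map_cons, List.map_map]
  simp only [Nat.cast_zero, mul_zero, add_zero]
  congr 1
  exact List.map_congr_left (fun k _ => by simp only [Function.comp]; push_cast; ring)

theorem pv_shift (s : String) (a b : Int) (ha : 0 ≤ a) :
    (PySem.List.pyRange (a+2) (b+2) 2).map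
        (fun i => PySem.Str.slice s (some (max 0 (i-2))) (some i))
      = (PySem.List.pyRange a b 2).map
        (fun i => PySem.Str.slice s (some i) (some (i + 2))) := by
  rw [pv_up (a+2) (b+2), pv_up a b, List.map_map, List.map_map]
  have hc : ((b + 2 - (a+2) + 1)/2).toNat = ((b - a + 1)/2).toNat := by omega
  rw [hc]
  apply List.map_congr_left
  intro k _
  simp only [Function.comp]
  have h1 : max 0 (a + 2 + 2*(k:Int) - 2) = a + 2*(k:Int) := by omega
  have h2 : a + 2 + 2*(k:Int) = (a + 2*(k:Int)) + 2 := by ring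
  rw [h1, h2]

-- ===== VERDICT (by name: the statement is the Claim_ definition above) =====
theorem separador_spec : Claim_equal_separador := by
  intro string _
  unfold Spec_separador separador separador_alt
  rw [PySem.List.foldl_append_singleton_eq_map]
  dsimp only
  rw [List.nil_append, ← List.map_reverse, pv_rev]
  by_cases hodd : string.toList.length % 2 = 1
  · have h1 : (string.toList.length % 2 == 1) = true := by rw [hodd]; rfl
    simp only [hodd, if_pos]
    obtain ⟨c, cs, hs⟩ : ∃ c cs, string.toList = c :: cs := by
      cases h : string.toList with
      | nil => rw [h] at hodd; simp at hodd
      | cons c cs => exact ⟨c, cs, rfl⟩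
    rw [pv_cons 1 ((string.toList.length : Int) + 2) (by omega), List.map_cons,
        pv_shift string 1 (string.toList.length : Int) (by omega)]
    -- the leading single character: string[0] versus string[max(0,-1):1]
    simp [PySem.Str.slice, hs]
    rw [PySem.List.slice_to (xs := c :: cs) (b := 1) (by norm_num)]
    rfl
  · have h1 : (string.toList.length % 2 == 1) = false := by
      simp only [beq_eq_false_iff_ne, ne_eq]; exact hodd
    simp only [h1, hodd, if_false, Bool.false_eq_true, List.nil_append]
    have hsh := pv_shift string 0 (string.toList.length : Int) (by omega)
    rw [show ((0:Int)+2) = 2 from by norm_num] at hsh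
    rw [hsh]
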